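-- pv_equiv track=rewrite | github.com/Marcuss-ops/PipelineGen | src/python-legacy/video/entity_stack_grouper.py | _normalize_text_for_containment
-- ===== SOURCE A (Python) =====
-- def _normalize_text_for_containment(value: str) -> str:
--     if not isinstance(value, str):
--         return ""
--     s = value.lower()
--     out_chars = []
--     prev_space = False
--     for ch in s:
--         if ch.isalnum():
--             out_chars.append(ch)
--             prev_space = False
--         else:
--             if not prev_space:
--                 out_chars.append(" ")
--                 prev_space = True
--     normalized = "".join(out_chars).strip()
--     # Collassa spazi multipli
--     return " ".join(normalized.split())
-- ===== SOURCE B (Python) =====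
-- from itertools import groupby
--
--
-- def _normalize_text_for_containment(value: str) -> str:
--     if not isinstance(value, str):
--         return ""
--     return " ".join(
--         "".join(g) for k, g in groupby(value.lower(), key=str.isalnum) if k
--     )
-- ===== Notes on version B (the rewrite author's own statement) =====
-- stated objective: simpler
-- what changed: Replaced the explicit character-by-character state machine (prev_space flag, append loop, then strip and re-split) by a one-expression tokenization: groupby the lowercased string into maximal alnum runs and join them with single spaces.
import Mathlib
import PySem

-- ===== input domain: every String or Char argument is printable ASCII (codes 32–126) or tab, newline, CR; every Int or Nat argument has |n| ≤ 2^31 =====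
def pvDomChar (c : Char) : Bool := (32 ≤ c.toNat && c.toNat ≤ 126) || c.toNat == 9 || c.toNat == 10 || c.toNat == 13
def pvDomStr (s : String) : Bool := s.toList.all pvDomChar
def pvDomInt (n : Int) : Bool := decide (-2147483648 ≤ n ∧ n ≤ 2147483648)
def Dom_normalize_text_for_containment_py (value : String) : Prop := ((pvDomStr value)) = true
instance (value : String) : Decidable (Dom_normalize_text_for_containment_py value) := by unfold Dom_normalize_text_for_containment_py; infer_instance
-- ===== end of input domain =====

-- B replaces A's prev_space state machine (emit chars, strip, re-split, re-join) by a direct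
-- tokenization into maximal alphanumeric runs joined by single spaces; same O(n) cost, simpler.


-- ===== PORT A =====
-- the loop body of A's 'for ch in s' (state = (out_chars, prev_space))
def pvStepA (st : List Char × Bool) (ch : Char) : List Char × Bool :=
  if PySem.Chars.isalnum ch then (st.1 ++ [ch], false)
  else if st.2 then st else (st.1 ++ [' '], true)

def normalize_text_for_containment_py (value : String) : String :=
  -- 'if not isinstance(value, str)' is always False here: value : String
  let s := PySem.Chars.lower value.toList
  let r := s.foldl pvStepA ([], false)
  let normalized := PySem.Chars.strip r.1
  String.mk (PySem.Chars.join [' '] (PySem.Chars.split₀ normalized))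

-- ===== PORT B =====
-- itertools.groupby(s, key=p), keeping only the groups whose key is True:
-- the maximal runs of characters satisfying p
def pvRuns (p : Char → Bool) : List Char → List (List Char)
  | [] => []
  | c :: cs =>
    if p c then (c :: cs.takeWhile p) :: pvRuns p (cs.dropWhile p)
    else pvRuns p cs
termination_by cs => cs.length
decreasing_by
  · exact Nat.lt_succ_of_le (List.length_dropWhile_le _ _)
  · simp

def normalize_text_for_containment_py_alt (value : String) : String :=
  String.mk (PySem.Chars.join [' '] (pvRuns PySem.Chars.isalnum (PySem.Chars.lower value.toList)))

-- ===== PRECONDITION & SPEC =====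
def Spec_normalize_text_for_containment_py (value : String) (out : String) : Prop := out = normalize_text_for_containment_py_alt value
instance (value : String) (out : String) : Decidable (Spec_normalize_text_for_containment_py value out) := by unfold Spec_normalize_text_for_containment_py; infer_instance

-- ===== CLAIM (what is proved, stated in full; the proofs are below) =====
def Claim_equal_normalize_text_for_containment_py : Prop := ∀ (value : String), Dom_normalize_text_for_containment_py value → Spec_normalize_text_for_containment_py value (normalize_text_for_containment_py value)

-- ===== LEMMAS AND PROOFS =====

-- abbreviation used only by the proofs: the characters A's loop emits from input cs with prev_space = p
def pvH : List Char → Bool → List Char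
  | [], _ => []
  | c :: cs, p =>
    if PySem.Chars.isalnum c then c :: pvH cs false
    else if p then pvH cs p else ' ' :: pvH cs true

theorem pvFoldA_fst (s : List Char) (o : List Char) (p : Bool) :
    (s.foldl pvStepA (o, p)).1 = o ++ pvH s p := by
  induction s generalizing o p with
  | nil => simp [pvH]
  | cons c cs ih =>
    by_cases h : PySem.Chars.isalnum c = true
    · simp [pvStepA, pvH, h, ih]
    · by_cases hp : p <;> simp [pvStepA, pvH, h, hp, ih]

theorem pvAlnum_not_space (c : Char) (h : PySem.Chars.isalnum c = true) :
    PySem.Chars.isspace c = false := by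
  simp [PySem.Chars.isalnum, PySem.Chars.isalpha, PySem.Chars.isdigit, PySem.Chars.isupper,
    PySem.Chars.islower, Char.le_def, UInt32.le_iff_toNat_le] at h
  simp [PySem.Chars.isspace]
  omega

-- split₀.go unfolded into maximal non-whitespace runs
theorem pvSplitGo_eq (s cur : List Char) (acc : List (List Char)) :
    PySem.Chars.split₀.go s cur acc =
      acc.reverse ++
        (if cur = [] then pvRuns (fun c => !PySem.Chars.isspace c) s
         else (cur.reverse ++ s.takeWhile (fun c => !PySem.Chars.isspace c)) ::
              pvRuns (fun c => !PySem.Chars.isspace c) (s.dropWhile (fun c => !PySem.Chars.isspace c))) := by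
  induction s generalizing cur acc with
  | nil =>
    by_cases h : cur = [] <;> simp [PySem.Chars.split₀.go, h, pvRuns]
  | cons c rest ih =>
    by_cases hsp : PySem.Chars.isspace c = true
    · by_cases h : cur = []
      · simp [PySem.Chars.split₀.go, hsp, h, ih, pvRuns]
      · simp [PySem.Chars.split₀.go, hsp, h, ih, pvRuns]
    · by_cases h : cur = []
      · simp [PySem.Chars.split₀.go, hsp, h, ih, pvRuns, List.takeWhile_cons, List.dropWhile_cons]
      · simp [PySem.Chars.split₀.go, hsp, h, ih, pvRuns, List.takeWhile_cons, List.dropWhile_cons]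

theorem pvSplit₀_eq_runs (s : List Char) :
    PySem.Chars.split₀ s = pvRuns (fun c => !PySem.Chars.isspace c) s := by
  simpa using pvSplitGo_eq s [] []

-- pvRuns ignores a prefix of characters failing p
theorem pvRuns_prefix_neg (p : Char → Bool) (pre s : List Char) (h : ∀ c ∈ pre, p c = false) :
    pvRuns p (pre ++ s) = pvRuns p s := by
  induction pre with
  | nil => rfl
  | cons c cs ih =>
    have hc : p c = false := h c (by simp)
    simp [pvRuns, hc, ih (fun d hd => h d (by simp [hd]))]

-- pvRuns ignores a suffix of characters failing p
theorem pvRuns_suffix_neg (p : Char → Bool) (s suf : List Char) (h : ∀ c ∈ suf, p c = false) :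
    pvRuns p (s ++ suf) = pvRuns p s := by
  induction hn : s.length using Nat.strong_induction_on generalizing s with
  | _ n ih =>
    match s with
    | [] => simpa using pvRuns_prefix_neg p suf [] h
    | c :: s' =>
      by_cases hc : p c = true
      · simp only [List.length_cons] at hn
        by_cases hd : s'.dropWhile p = []
        · have hall : ∀ x ∈ s', p x = true := List.dropWhile_eq_nil_iff.mp hd
          have htw : s'.takeWhile p = s' := List.takeWhile_eq_self_iff.mpr hall
          have hsuf : suf.takeWhile p = [] := by
            cases suf with
            | nil => rfl
            | cons d ds => simp [List.takeWhile_cons, h d (by simp)]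
          have hrsuf : pvRuns p suf = [] := by
            have := pvRuns_prefix_neg p suf [] h
            simpa [pvRuns] using this
          have h1 : (s' ++ suf).takeWhile p = s' := by
            rw [List.takeWhile_append, if_pos (by rw [htw]), hsuf, List.append_nil]
          have h2 : (s' ++ suf).dropWhile p = suf := by
            have hsufd : suf.dropWhile p = suf := by
              cases suf with
              | nil => rfl
              | cons d ds => simp [List.dropWhile_cons, h d (by simp)]
            rw [List.dropWhile_append, if_pos (by simp [hd]), hsufd]
          simp [pvRuns, hc, h1, h2, htw, hd, hrsuf]
        · have hne : ¬ (s'.takeWhile p).length = s'.length := fun hlen =>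
            hd (List.dropWhile_eq_nil_iff.mpr (List.takeWhile_eq_self_iff.mp
              ((List.takeWhile_prefix p).eq_of_length hlen)))
          have h1 : (s' ++ suf).takeWhile p = s'.takeWhile p := by
            rw [List.takeWhile_append, if_neg hne]
          have h2 : (s' ++ suf).dropWhile p = s'.dropWhile p ++ suf := by
            rw [List.dropWhile_append, if_neg (by simp [hd])]
          have hlen : (s'.dropWhile p).length < n := by
            have := List.length_dropWhile_le p s'
            omega
          simp only [List.cons_append, pvRuns, hc, h1, h2]
          rw [ih _ hlen _ rfl]
          simp
      · have hc' : p c = false := by simpa using hc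
        simp only [List.length_cons] at hn
        have hlen : s'.length < n := by omega
        simp only [List.cons_append, pvRuns, hc', Bool.false_eq_true, if_false]
        exact ih _ hlen _ rfl

-- strip removes an all-whitespace prefix and suffix, which pvRuns (non-space) ignores
theorem pvRuns_strip (s : List Char) :
    pvRuns (fun c => !PySem.Chars.isspace c) (PySem.Chars.strip s) =
    pvRuns (fun c => !PySem.Chars.isspace c) s := by
  unfold PySem.Chars.strip PySem.Chars.lstrip PySem.Chars.rstrip
  set p : Char → Bool := fun c => !PySem.Chars.isspace c with hp
  have hdrop : ∀ t : List Char, pvRuns p (t.dropWhile PySem.Chars.isspace) = pvRuns p t := by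
    intro t
    conv_rhs => rw [← List.takeWhile_append_dropWhile (p := PySem.Chars.isspace) (l := t)]
    exact (pvRuns_prefix_neg p _ _ (fun c hc => by
      have := List.mem_takeWhile_imp hc
      simp [hp, this])).symm
  have hrs : ∀ t : List Char,
      pvRuns p ((t.reverse.dropWhile PySem.Chars.isspace).reverse) = pvRuns p t := by
    intro t
    have hdecomp : t = (t.reverse.dropWhile PySem.Chars.isspace).reverse ++
        (t.reverse.takeWhile PySem.Chars.isspace).reverse := by
      nth_rewrite 1 [← List.reverse_reverse t,
        ← List.takeWhile_append_dropWhile (p := PySem.Chars.isspace) (l := t.reverse)]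
      rw [List.reverse_append]
    conv_rhs => rw [hdecomp]
    exact (pvRuns_suffix_neg p _ _ (fun c hc => by
      have := List.mem_takeWhile_imp (by simpa using hc)
      simp [hp, this])).symm
  rw [hrs, hdrop]

-- the loop output decomposes along a maximal alnum run
theorem pvH_split (cs : List Char) :
    pvH cs false = cs.takeWhile PySem.Chars.isalnum ++ pvH (cs.dropWhile PySem.Chars.isalnum) false := by
  induction cs with
  | nil => simp [pvH]
  | cons c cs ih =>
    by_cases h : PySem.Chars.isalnum c = true
    · simp [pvH, h, List.takeWhile_cons, List.dropWhile_cons, ih]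
    · simp [pvH, h, List.takeWhile_cons, List.dropWhile_cons]

-- main simulation: non-space runs of A's emitted characters = alnum runs of the input
theorem pvRuns_pvH (s : List Char) (p : Bool) :
    pvRuns (fun c => !PySem.Chars.isspace c) (pvH s p) = pvRuns PySem.Chars.isalnum s := by
  induction hn : s.length using Nat.strong_induction_on generalizing s p with
  | _ n ih =>
    match s with
    | [] => simp [pvH, pvRuns]
    | c :: cs =>
      simp only [List.length_cons] at hn
      by_cases hc : PySem.Chars.isalnum c = true
      · have hns : PySem.Chars.isspace c = false := pvAlnum_not_space c hc
        have hallNS : ∀ d ∈ cs.takeWhile PySem.Chars.isalnum, (!PySem.Chars.isspace d) = true :=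
          fun d hd => by simp [pvAlnum_not_space d (List.mem_takeWhile_imp hd)]
        have hwNS : (cs.takeWhile PySem.Chars.isalnum).takeWhile (fun c => !PySem.Chars.isspace c)
            = cs.takeWhile PySem.Chars.isalnum := List.takeWhile_eq_self_iff.mpr hallNS
        have hwdrop : (cs.takeWhile PySem.Chars.isalnum).dropWhile (fun c => !PySem.Chars.isspace c)
            = [] := List.dropWhile_eq_nil_iff.mpr hallNS
        have hhead : pvH (cs.dropWhile PySem.Chars.isalnum) false = [] ∨
            ∃ t, pvH (cs.dropWhile PySem.Chars.isalnum) false = ' ' :: t := by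
          cases hrr : cs.dropWhile PySem.Chars.isalnum with
          | nil => exact Or.inl rfl
          | cons d r' =>
            have hdneg : ¬ PySem.Chars.isalnum d = true := by
              have := List.head_dropWhile_not (p := PySem.Chars.isalnum) (l := cs)
                (by rw [hrr]; simp)
              simpa [hrr] using this
            exact Or.inr ⟨pvH r' true, by simp [pvH, hdneg]⟩
        have htwr : (pvH (cs.dropWhile PySem.Chars.isalnum) false).takeWhile
            (fun c => !PySem.Chars.isspace c) = [] := by
          rcases hhead with h0 | ⟨t, ht⟩
          · simp [h0]
          · rw [ht]; simp [List.takeWhile_cons, show PySem.Chars.isspace ' ' = true by decide]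
        have hdwr : (pvH (cs.dropWhile PySem.Chars.isalnum) false).dropWhile
            (fun c => !PySem.Chars.isspace c) = pvH (cs.dropWhile PySem.Chars.isalnum) false := by
          rcases hhead with h0 | ⟨t, ht⟩
          · simp [h0]
          · rw [ht]; simp [List.dropWhile_cons, show PySem.Chars.isspace ' ' = true by decide]
        have h1 : (pvH cs false).takeWhile (fun c => !PySem.Chars.isspace c) =
            cs.takeWhile PySem.Chars.isalnum := by
          rw [pvH_split cs, List.takeWhile_append, if_pos (by rw [hwNS]), htwr, List.append_nil]
        have h2 : (pvH cs false).dropWhile (fun c => !PySem.Chars.isspace c) =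
            pvH (cs.dropWhile PySem.Chars.isalnum) false := by
          rw [pvH_split cs, List.dropWhile_append, if_pos (by simp [hwdrop]), hdwr]
        have hrlen : (cs.dropWhile PySem.Chars.isalnum).length < n := by
          have := List.length_dropWhile_le PySem.Chars.isalnum cs
          omega
        have hstep : pvH (c :: cs) p = c :: pvH cs false := by
          cases p <;> simp [pvH, hc]
        rw [hstep]
        simp only [pvRuns, hns, Bool.not_false, hc, if_pos rfl, h1, h2]
        rw [ih _ hrlen _ false rfl]
        simp
      · have hcs : cs.length < n := by omega
        by_cases hp : p
        · have hstep : pvH (c :: cs) p = pvH cs p := by simp [pvH, hc, hp]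
          rw [hstep, ih _ hcs _ p rfl]
          simp [pvRuns, hc]
        · have hstep : pvH (c :: cs) p = ' ' :: pvH cs true := by simp [pvH, hc, hp]
          rw [hstep]
          have hspc : (!PySem.Chars.isspace ' ') = false := by decide
          simp only [pvRuns, hspc, Bool.false_eq_true, if_false]
          rw [ih _ hcs _ true rfl]
          simp [pvRuns, hc]

-- ===== VERDICT (by name: the statement is the Claim_ definition above) =====
theorem normalize_text_for_containment_py_spec : Claim_equal_normalize_text_for_containment_py := by
  intro value _
  unfold Spec_normalize_text_for_containment_py
  unfold normalize_text_for_containment_py normalize_text_for_containment_py_alt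
  simp only
  rw [pvFoldA_fst, List.nil_append, pvSplit₀_eq_runs, pvRuns_strip, pvRuns_pvH]
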